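-- pv_equiv track=rewrite | github.com/yjbyte/custom_chgnet | optimization/particle_encoding.py | _calculateSwapsToTarget
-- ===== SOURCE A (Python) =====
-- from typing import Any, Dict, List, Optional, Tuple
--
-- def _calculateSwapsToTarget(current: List[str], target: List[str]) -> List[Tuple[int, int]]:
--     """
--     计算从current到target需要的交换操作序列
--
--     Args:
--         current: 当前排列
--         target: 目标排列
--
--     Returns:
--         List[Tuple[int, int]]: 交换操作列表（索引对）
--     """
--     swaps = []
--     temp = current.copy()
--
--     for i in range(len(temp)):
--         if temp[i] != target[i]:
--             # 找到目标元素的位置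
--             for j in range(i + 1, len(temp)):
--                 if temp[j] == target[i]:
--                     swaps.append((i, j))
--                     temp[i], temp[j] = temp[j], temp[i]
--                     break
--
--     return swaps
-- ===== SOURCE B (Python) =====
-- def _calculateSwapsToTarget(current, target):
--     n = len(current)
--     vals = list(current)
--     # pos[v] = sorted list of live positions currently holding value v
--     pos = {}
--     for idx in range(n):
--         v = vals[idx]
--         if v in pos:
--             pos[v].append(idx)
--         else:
--             pos[v] = [idx]
--     swaps = []
--     for i in range(n):
--         u = vals[i]
--         pos[u].pop(0)  # this entry is i: the smallest live position, which holds u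
--         v = target[i]
--         if u != v:
--             lst = pos.get(v, [])
--             if lst:
--                 j = lst.pop(0)  # smallest position > i holding v
--                 swaps.append((i, j))
--                 vals[i], vals[j] = vals[j], vals[i]
--                 lu = pos[u]  # u moved to position j; keep pos[u] sorted
--                 k = 0
--                 while k < len(lu) and lu[k] < j:
--                     k += 1
--                 lu.insert(k, j)
--     return swaps
-- ===== Notes on version B (the rewrite author's own statement) =====
-- stated objective: faster
-- what changed: Replaces A's O(n) inner scan for target[i] at every mismatch by a dict mapping each value to its sorted list of live positions, maintained incrementally across swaps (pop the head, sorted-insert the displaced index), so the first matching position > i is read off the list head.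
import Mathlib
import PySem

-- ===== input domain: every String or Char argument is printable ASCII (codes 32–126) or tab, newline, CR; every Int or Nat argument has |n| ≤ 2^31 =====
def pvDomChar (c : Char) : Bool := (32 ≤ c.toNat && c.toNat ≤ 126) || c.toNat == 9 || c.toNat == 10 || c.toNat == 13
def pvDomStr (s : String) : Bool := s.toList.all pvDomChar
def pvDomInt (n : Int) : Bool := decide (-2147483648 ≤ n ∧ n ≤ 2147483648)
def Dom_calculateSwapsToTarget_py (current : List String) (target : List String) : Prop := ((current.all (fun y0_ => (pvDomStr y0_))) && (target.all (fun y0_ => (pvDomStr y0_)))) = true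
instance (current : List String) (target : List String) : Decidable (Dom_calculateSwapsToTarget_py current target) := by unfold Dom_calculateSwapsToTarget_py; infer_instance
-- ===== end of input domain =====

-- B replaces A's inner linear scan for target[i] by a dict of per-value sorted position
-- lists maintained across swaps (objective: faster, measured).

-- ===== PORT A =====
-- shared helper for the Python line 'temp[i], temp[j] = temp[j], temp[i]' (both sources contain it verbatim)
def pySwapAt (l : List String) (i j : Nat) : List String :=
  let a := l.getD i ""
  let b := l.getD j ""
  (l.set i b).set j a

-- inner loop 'for j in range(i+1, len(temp)): if temp[j] == target[i]: … break'
def aFindJ (temp : List String) (tv : String) : Nat → Nat → Option Nat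
  | 0, _ => none
  | fuel + 1, j =>
    if j < temp.length then
      if temp.getD j "" = tv then some j else aFindJ temp tv fuel (j + 1)
    else none

-- outer loop 'for i in range(len(temp))'; target[i] raising IndexError = the none branch (outside Pre_)
def aLoop (target : List String) : List String → Nat → Nat → List (Int × Int) → List (Int × Int)
  | _, 0, _, swaps => swaps
  | temp, fuel + 1, i, swaps =>
    if i < temp.length then
      match PySem.List.pyGet? target (i : Int) with
      | none => swaps
      | some tv =>
        if temp.getD i "" = tv then aLoop target temp fuel (i + 1) swaps
        else
          match aFindJ temp tv temp.length (i + 1) with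
          | none => aLoop target temp fuel (i + 1) swaps
          | some j => aLoop target (pySwapAt temp i j) fuel (i + 1) (swaps ++ [((i : Int), (j : Int))])
    else swaps

def calculateSwapsToTarget_py (current : List String) (target : List String) : List (Int × Int) :=
  aLoop target current current.length 0 []

-- ===== PORT B =====
-- Source B's hand-written sorted insert (the 'while k < len(lu) and lu[k] < j' scan + lu.insert(k, j))
def bInsort (lst : List Int) (j : Int) : List Int :=
  match lst with
  | [] => [j]
  | x :: xs => if x < j then x :: bInsort xs j else j :: x :: xs

-- 'for idx in range(n): v = vals[idx]; pos[v].append(idx) / pos[v] = [idx]'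
def bBuild (vals : List String) : Nat → Nat → PySem.Dict String (List Int) → PySem.Dict String (List Int)
  | 0, _, d => d
  | fuel + 1, idx, d =>
    if idx < vals.length then
      let v := vals.getD idx ""
      let d' := if d.contains v then d.insert v (d.getD v [] ++ [(idx : Int)]) else d.insert v [(idx : Int)]
      bBuild vals fuel (idx + 1) d'
    else d

-- 'for i in range(n)'; pos[u].pop(0) on an empty list (unreachable) and target[i] IndexError = the none branches
def bLoop (target : List String) : List String → PySem.Dict String (List Int) → Nat → Nat →
    List (Int × Int) → List (Int × Int)
  | _, _, 0, _, swaps => swaps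
  | vals, pos, fuel + 1, i, swaps =>
    if i < vals.length then
      let u := vals.getD i ""
      match PySem.List.pop? (pos.getD u []) 0 with
      | none => swaps
      | some (_, lu0) =>
        let pos1 := pos.insert u lu0
        match PySem.List.pyGet? target (i : Int) with
        | none => swaps
        | some v =>
          if u = v then bLoop target vals pos1 fuel (i + 1) swaps
          else
            match pos1.getD v [] with
            | [] => bLoop target vals pos1 fuel (i + 1) swaps
            | j :: rest =>
              let pos2 := pos1.insert v rest
              let pos3 := pos2.insert u (bInsort (pos2.getD u []) j)
              bLoop target (pySwapAt vals i j.toNat) pos3 fuel (i + 1) (swaps ++ [((i : Int), j)])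
    else swaps

def calculateSwapsToTarget_py_alt (current : List String) (target : List String) : List (Int × Int) :=
  bLoop target current (bBuild current current.length 0 PySem.Dict.empty) current.length 0 []

-- ===== PRECONDITION & SPEC =====
-- A evaluates target[i] for every i < len(current), so it raises IndexError iff len(target) < len(current);
-- exactly those inputs are excluded.
def Pre_calculateSwapsToTarget_py (current : List String) (target : List String) : Prop :=
  current.length ≤ target.length
instance (current : List String) (target : List String) : Decidable (Pre_calculateSwapsToTarget_py current target) := by
  unfold Pre_calculateSwapsToTarget_py; infer_instance

def pvWitness_calculateSwapsToTarget_py : List String × List String := (["b", "a", "a"], ["a", "b", "a"])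

def Spec_calculateSwapsToTarget_py (current : List String) (target : List String) (out : List (Int × Int)) : Prop := out = calculateSwapsToTarget_py_alt current target
instance (current : List String) (target : List String) (out : List (Int × Int)) : Decidable (Spec_calculateSwapsToTarget_py current target out) := by unfold Spec_calculateSwapsToTarget_py; infer_instance

-- ===== CLAIM (what is proved, stated in full; the proofs are below) =====
def Claim_equal_calculateSwapsToTarget_py : Prop := ∀ (current : List String) (target : List String), Dom_calculateSwapsToTarget_py current target → Pre_calculateSwapsToTarget_py current target → Spec_calculateSwapsToTarget_py current target (calculateSwapsToTarget_py current target)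

-- ===== LEMMAS AND PROOFS =====

-- The simulation invariant: at outer step i, for every value v the dict holds exactly the
-- positions k with i ≤ k < len(vals) and vals[k] = v, in strictly increasing order.
def BInv (vals : List String) (i : Nat) (pos : PySem.Dict String (List Int)) : Prop :=
  ∀ v : String, (pos.getD v []).Pairwise (· < ·) ∧
    ∀ k : Int, k ∈ pos.getD v [] ↔ ∃ m : Nat, k = (m : Int) ∧ i ≤ m ∧ m < vals.length ∧ vals.getD m "" = v

lemma length_pySwapAt (l : List String) (i j : Nat) : (pySwapAt l i j).length = l.length := by
  simp [pySwapAt]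

lemma getD_pySwapAt (l : List String) (i j : Nat) (hi : i < l.length) (hj : j < l.length) (m : Nat) :
    (pySwapAt l i j).getD m "" =
      if m = j then l.getD i "" else if m = i then l.getD j "" else l.getD m "" := by
  simp only [pySwapAt, List.getD_eq_getElem?_getD, List.getElem?_set, List.length_set]
  by_cases h1 : m = j
  · subst h1; simp [hj]
  · rw [if_neg (fun h => h1 h.symm), if_neg h1]
    by_cases h2 : m = i
    · subst h2; simp [hi]
    · rw [if_neg (fun h => h2 h.symm), if_neg h2]

lemma head_min (l : List Int) (x : Int) (hs : l.Pairwise (· < ·)) (hx : x ∈ l)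
    (hmin : ∀ y ∈ l, x ≤ y) : l = x :: l.tail := by
  cases l with
  | nil => cases hx
  | cons a t =>
    have hax : a = x := by
      rcases List.mem_cons.1 hx with h | h
      · exact h.symm
      · have h1 := (List.pairwise_cons.1 hs).1 x h
        have h2 := hmin a (List.mem_cons_self ..)
        omega
    simp [hax]

lemma mem_bInsort (l : List Int) (j k : Int) : k ∈ bInsort l j ↔ k = j ∨ k ∈ l := by
  induction l with
  | nil => simp [bInsort]
  | cons x xs ih =>
    simp only [bInsort]
    split_ifs <;> (simp [ih]; try tauto)

lemma pairwise_bInsort (l : List Int) (j : Int) (hs : l.Pairwise (· < ·)) (hj : j ∉ l) :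
    (bInsort l j).Pairwise (· < ·) := by
  induction l with
  | nil => simp [bInsort]
  | cons x xs ih =>
    simp only [bInsort]
    obtain ⟨hx, hxs⟩ := List.pairwise_cons.1 hs
    have hjx : j ≠ x := by intro h; exact hj (h ▸ List.mem_cons_self ..)
    have hjxs : j ∉ xs := fun h => hj (List.mem_cons_of_mem _ h)
    by_cases h : x < j
    · rw [if_pos h]
      refine List.pairwise_cons.2 ⟨?_, ih hxs hjxs⟩
      intro y hy
      rcases (mem_bInsort xs j y).1 hy with rfl | hy'
      · exact h
      · exact hx y hy'
    · rw [if_neg h]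
      refine List.pairwise_cons.2 ⟨?_, hs⟩
      intro y hy
      rcases List.mem_cons.1 hy with rfl | hy'
      · omega
      · exact lt_trans (by omega) (hx y hy')

lemma aFindJ_none_of (temp : List String) (tv : String) :
    ∀ (n j0 : Nat), temp.length - j0 ≤ n →
      (∀ m, j0 ≤ m → m < temp.length → temp.getD m "" ≠ tv) → aFindJ temp tv n j0 = none := by
  intro n
  induction n with
  | zero => intro j0 _ _; rfl
  | succ n ih =>
    intro j0 hn h
    rw [aFindJ]
    by_cases hj : j0 < temp.length
    · rw [if_pos hj, if_neg (h j0 le_rfl hj)]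
      exact ih (j0 + 1) (by omega) (fun m hm => h m (by omega))
    · rw [if_neg hj]

lemma aFindJ_some_of (temp : List String) (tv : String) :
    ∀ (n j0 j : Nat), temp.length - j0 ≤ n → j0 ≤ j → j < temp.length → temp.getD j "" = tv →
      (∀ m, j0 ≤ m → m < j → temp.getD m "" ≠ tv) → aFindJ temp tv n j0 = some j := by
  intro n
  induction n with
  | zero => intro j0 j hn h1 h2 _ _; omega
  | succ n ih =>
    intro j0 j hn h1 h2 h3 h4
    rw [aFindJ, if_pos (by omega : j0 < temp.length)]
    by_cases he : j0 = j
    · subst he; rw [if_pos h3]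
    · rw [if_neg (h4 j0 le_rfl (by omega))]
      exact ih (j0 + 1) j (by omega) (by omega) h2 h3 (fun m hm => h4 m (by omega))

lemma initInv_of_done (vals : List String) (idx : Nat) (d : PySem.Dict String (List Int))
    (hidx : vals.length ≤ idx)
    (hd : ∀ v : String, (d.getD v []).Pairwise (· < ·) ∧
      ∀ k : Int, k ∈ d.getD v [] ↔ ∃ m : Nat, k = (m : Int) ∧ m < idx ∧ m < vals.length ∧ vals.getD m "" = v) :
    BInv vals 0 d := by
  intro v
  refine ⟨(hd v).1, fun k => ?_⟩
  rw [(hd v).2 k]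
  constructor
  · rintro ⟨m, rfl, _, hm2, hm3⟩; exact ⟨m, rfl, Nat.zero_le _, hm2, hm3⟩
  · rintro ⟨m, rfl, _, hm2, hm3⟩; exact ⟨m, rfl, by omega, hm2, hm3⟩

lemma bBuild_spec (vals : List String) :
    ∀ (n idx : Nat) (d : PySem.Dict String (List Int)), vals.length - idx ≤ n →
      (∀ v : String, (d.getD v []).Pairwise (· < ·) ∧
        ∀ k : Int, k ∈ d.getD v [] ↔ ∃ m : Nat, k = (m : Int) ∧ m < idx ∧ m < vals.length ∧ vals.getD m "" = v) →
      BInv vals 0 (bBuild vals n idx d) := by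
  intro n
  induction n with
  | zero =>
    intro idx d hn hd
    exact initInv_of_done vals idx d (by omega) hd
  | succ n ih =>
    intro idx d hn hd
    rw [bBuild]
    by_cases hidx : idx < vals.length
    · rw [if_pos hidx]
      simp only []
      set v0 := vals.getD idx "" with hv0
      set d' := if d.contains v0 then d.insert v0 (d.getD v0 [] ++ [(idx : Int)]) else d.insert v0 [(idx : Int)] with hd'
      have hgd' : ∀ v : String, d'.getD v [] =
          if v = v0 then d.getD v0 [] ++ [(idx : Int)] else d.getD v [] := by
        intro v
        rw [hd']
        by_cases hc : d.contains v0
        · rw [if_pos hc]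
          by_cases hv : v = v0
          · subst hv; rw [if_pos rfl, PySem.Dict.getD_insert_self]
          · rw [if_neg hv, PySem.Dict.getD_insert_of_ne _ _ _ hv]
        · rw [if_neg hc]
          by_cases hv : v = v0
          · subst hv
            rw [if_pos rfl, PySem.Dict.getD_insert_self, PySem.Dict.getD_of_not_contains _ _ (by simpa using hc)]
            simp
          · rw [if_neg hv, PySem.Dict.getD_insert_of_ne _ _ _ hv]
      refine ih (idx + 1) d' (by omega) ?_
      intro v
      rw [hgd' v]
      by_cases hv : v = v0
      · subst hv
        rw [if_pos rfl]
        constructor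
        · refine List.pairwise_append.2 ⟨(hd v0).1, by simp, ?_⟩
          intro a ha b hb
          obtain ⟨m, rfl, hm1, _, _⟩ := ((hd v0).2 a).1 ha
          simp only [List.mem_singleton] at hb
          omega
        · intro k
          simp only [List.mem_append, List.mem_singleton, (hd v0).2 k]
          constructor
          · rintro (⟨m, rfl, hm1, hm2, hm3⟩ | rfl)
            · exact ⟨m, rfl, by omega, hm2, hm3⟩
            · exact ⟨idx, rfl, by omega, hidx, hv0.symm⟩
          · rintro ⟨m, rfl, hm1, hm2, hm3⟩
            by_cases hmi : m = idx
            · subst hmi; right; rfl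
            · left; exact ⟨m, rfl, by omega, hm2, hm3⟩
      · rw [if_neg hv]
        refine ⟨(hd v).1, fun k => ?_⟩
        rw [(hd v).2 k]
        constructor
        · rintro ⟨m, rfl, hm1, hm2, hm3⟩; exact ⟨m, rfl, by omega, hm2, hm3⟩
        · rintro ⟨m, rfl, hm1, hm2, hm3⟩
          have hmi : m ≠ idx := by
            intro h; subst h; exact hv (hm3 ▸ hv0)
          exact ⟨m, rfl, by omega, hm2, hm3⟩
    · rw [if_neg hidx]
      exact initInv_of_done vals idx d (by omega) hd

lemma BInv_pop (vals : List String) (i : Nat) (pos : PySem.Dict String (List Int)) (u : String)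
    (hInv : BInv vals i pos) (hu : vals.getD i "" = u)
    (hl : pos.getD u [] = (i : Int) :: (pos.getD u []).tail) :
    BInv vals (i + 1) (pos.insert u (pos.getD u []).tail) := by
  intro v
  by_cases hv : v = u
  · rw [hv]
    rw [PySem.Dict.getD_insert_self]
    have hp := (hInv u).1
    rw [hl] at hp
    obtain ⟨hhead, htail⟩ := List.pairwise_cons.1 hp
    refine ⟨htail, fun k => ?_⟩
    constructor
    · intro hk
      have hk' : k ∈ pos.getD u [] := by rw [hl]; exact List.mem_cons_of_mem _ hk
      obtain ⟨m, rfl, hm1, hm2, hm3⟩ := ((hInv u).2 _).1 hk'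
      have him : (i : Int) < (m : Int) := hhead _ hk
      exact ⟨m, rfl, by omega, hm2, hm3⟩
    · rintro ⟨m, rfl, hm1, hm2, hm3⟩
      have hk' : ((m : Nat) : Int) ∈ pos.getD u [] := ((hInv u).2 _).2 ⟨m, rfl, by omega, hm2, hm3⟩
      rw [hl] at hk'
      rcases List.mem_cons.1 hk' with h | h
      · exfalso; omega
      · exact h
  · rw [PySem.Dict.getD_insert_of_ne _ _ _ hv]
    refine ⟨(hInv v).1, fun k => ?_⟩
    rw [(hInv v).2 k]
    constructor
    · rintro ⟨m, rfl, hm1, hm2, hm3⟩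
      have hmi : m ≠ i := by intro h; subst h; exact hv (hm3.symm.trans hu)
      exact ⟨m, rfl, by omega, hm2, hm3⟩
    · rintro ⟨m, rfl, hm1, hm2, hm3⟩
      exact ⟨m, rfl, by omega, hm2, hm3⟩

lemma BInv_swap (vals : List String) (i m0 : Nat) (pos : PySem.Dict String (List Int))
    (u tv : String) (tail rest : List Int)
    (hInv : BInv vals i pos) (hi : i < vals.length) (hm0 : i + 1 ≤ m0) (hm0l : m0 < vals.length)
    (hu : vals.getD i "" = u) (htv : vals.getD m0 "" = tv) (hne : u ≠ tv)
    (hlu : pos.getD u [] = (i : Int) :: tail) (hltv : pos.getD tv [] = (m0 : Int) :: rest) :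
    BInv (pySwapAt vals i m0) (i + 1)
      (((pos.insert u tail).insert tv rest).insert u (bInsort tail (m0 : Int))) := by
  have hget := getD_pySwapAt vals i m0 hi hm0l
  have hlen := length_pySwapAt vals i m0
  have hpu := (hInv u).1
  rw [hlu] at hpu
  obtain ⟨hu_head, htail_pw⟩ := List.pairwise_cons.1 hpu
  have hptv := (hInv tv).1
  rw [hltv] at hptv
  obtain ⟨htv_head, hrest_pw⟩ := List.pairwise_cons.1 hptv
  -- characterize tail membership
  have hmem_tail : ∀ k : Int, k ∈ tail ↔
      ∃ m : Nat, k = (m : Int) ∧ i + 1 ≤ m ∧ m < vals.length ∧ vals.getD m "" = u := by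
    intro k
    constructor
    · intro hk
      have hk' : k ∈ pos.getD u [] := by rw [hlu]; exact List.mem_cons_of_mem _ hk
      obtain ⟨m, rfl, hm1, hm2, hm3⟩ := ((hInv u).2 _).1 hk'
      have := hu_head _ hk
      exact ⟨m, rfl, by omega, hm2, hm3⟩
    · rintro ⟨m, rfl, hm1, hm2, hm3⟩
      have hk' : ((m : Nat) : Int) ∈ pos.getD u [] := ((hInv u).2 _).2 ⟨m, rfl, by omega, hm2, hm3⟩
      rw [hlu] at hk'
      rcases List.mem_cons.1 hk' with h | h
      · exfalso; omega
      · exact h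
  have hmem_rest : ∀ k : Int, k ∈ rest ↔
      ∃ m : Nat, k = (m : Int) ∧ i + 1 ≤ m ∧ m < vals.length ∧ m ≠ m0 ∧ vals.getD m "" = tv := by
    intro k
    constructor
    · intro hk
      have hk' : k ∈ pos.getD tv [] := by rw [hltv]; exact List.mem_cons_of_mem _ hk
      obtain ⟨m, rfl, hm1, hm2, hm3⟩ := ((hInv tv).2 _).1 hk'
      have hgt := htv_head _ hk
      have hmne : m ≠ i := by intro h; subst h; exact hne (hu.symm.trans hm3)
      exact ⟨m, rfl, by omega, hm2, by omega, hm3⟩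
    · rintro ⟨m, rfl, hm1, hm2, hm4, hm3⟩
      have hk' : ((m : Nat) : Int) ∈ pos.getD tv [] := ((hInv tv).2 _).2 ⟨m, rfl, by omega, hm2, hm3⟩
      rw [hltv] at hk'
      rcases List.mem_cons.1 hk' with h | h
      · exfalso; omega
      · exact h
  intro v
  by_cases hv : v = u
  · rw [hv]
    rw [PySem.Dict.getD_insert_self]
    constructor
    · refine pairwise_bInsort _ _ htail_pw ?_
      intro hmem
      obtain ⟨m, hm, _, _, hm3⟩ := (hmem_tail _).1 hmem
      have : m = m0 := by omega
      subst this
      exact hne (hm3.symm.trans htv)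
    · intro k
      rw [mem_bInsort]
      constructor
      · rintro (rfl | hk)
        · exact ⟨m0, rfl, hm0, by omega, by rw [hget, if_pos rfl]; exact hu⟩
        · obtain ⟨m, rfl, hm1, hm2, hm3⟩ := (hmem_tail _).1 hk
          have hmm0 : m ≠ m0 := by intro h; subst h; exact hne (by rw [← hm3, htv])
          have hmi : m ≠ i := by omega
          refine ⟨m, rfl, hm1, by omega, ?_⟩
          rw [hget, if_neg (by omega), if_neg (by omega), hm3]
      · rintro ⟨m, rfl, hm1, hm2, hm3⟩
        rw [hlen] at hm2
        rw [hget] at hm3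
        by_cases hmm0 : m = m0
        · subst hmm0; left; rfl
        · right
          rw [if_neg (by omega), if_neg (by omega)] at hm3
          exact (hmem_tail _).2 ⟨m, rfl, hm1, hm2, hm3⟩
  · by_cases hvtv : v = tv
    · rw [hvtv]
      rw [PySem.Dict.getD_insert_of_ne _ _ _ (hvtv ▸ hv), PySem.Dict.getD_insert_self]
      refine ⟨hrest_pw, fun k => ?_⟩
      rw [hmem_rest]
      constructor
      · rintro ⟨m, rfl, hm1, hm2, hm4, hm3⟩
        refine ⟨m, rfl, hm1, by omega, ?_⟩
        rw [hget, if_neg (by omega), if_neg (by omega), hm3]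
      · rintro ⟨m, rfl, hm1, hm2, hm3⟩
        rw [hlen] at hm2
        rw [hget] at hm3
        have hmm0 : m ≠ m0 := by
          intro h; subst h; rw [if_pos rfl, hu] at hm3; exact hne hm3
        rw [if_neg (by omega)] at hm3
        have hmi : m ≠ i := by omega
        rw [if_neg (by omega)] at hm3
        exact ⟨m, rfl, hm1, hm2, hmm0, hm3⟩
    · rw [PySem.Dict.getD_insert_of_ne _ _ _ hv, PySem.Dict.getD_insert_of_ne _ _ _ hvtv,
        PySem.Dict.getD_insert_of_ne _ _ _ hv]
      refine ⟨(hInv v).1, fun k => ?_⟩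
      rw [(hInv v).2 k]
      constructor
      · rintro ⟨m, rfl, hm1, hm2, hm3⟩
        have hmi : m ≠ i := by intro h; subst h; exact hv (by rw [← hm3, hu])
        have hmm0 : m ≠ m0 := by intro h; subst h; exact hvtv (by rw [← hm3, htv])
        refine ⟨m, rfl, by omega, by omega, ?_⟩
        rw [hget, if_neg (by omega), if_neg (by omega), hm3]
      · rintro ⟨m, rfl, hm1, hm2, hm3⟩
        rw [hlen] at hm2
        rw [hget] at hm3
        have hmm0 : m ≠ m0 := by
          intro h; subst h; rw [if_pos rfl, hu] at hm3; exact hv hm3.symm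
        rw [if_neg (by omega)] at hm3
        have hmi : m ≠ i := by omega
        rw [if_neg (by omega)] at hm3
        exact ⟨m, rfl, by omega, hm2, hm3⟩

lemma loop_eq (target : List String) :
    ∀ (n : Nat) (vals : List String) (i : Nat) (pos : PySem.Dict String (List Int))
      (swaps : List (Int × Int)), vals.length - i ≤ n → i ≤ vals.length → BInv vals i pos →
      aLoop target vals n i swaps = bLoop target vals pos n i swaps := by
  intro n
  induction n with
  | zero =>
    intro vals i pos swaps hn hile hInv
    rfl
  | succ n ih =>
    intro vals i pos swaps hn hile hInv
    rw [aLoop, bLoop]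
    by_cases hi : i < vals.length
    · rw [if_pos hi, if_pos hi]
      simp only []
      obtain ⟨hpw, hmem⟩ := hInv (vals.getD i "")
      have hiu : ((i : Nat) : Int) ∈ pos.getD (vals.getD i "") [] :=
        (hmem _).2 ⟨i, rfl, le_rfl, hi, rfl⟩
      have hmin : ∀ y ∈ pos.getD (vals.getD i "") [], (i : Int) ≤ y := by
        intro y hy
        obtain ⟨m, rfl, hm1, _, _⟩ := (hmem y).1 hy
        omega
      have hl := head_min _ _ hpw hiu hmin
      rw [hl, PySem.List.pop?_zero_cons]
      cases hg : PySem.List.pyGet? target (i : Int) with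
      | none => rfl
      | some tv =>
        dsimp only
        by_cases htv : vals.getD i "" = tv
        · rw [if_pos htv, if_pos htv]
          exact ih vals (i + 1) _ swaps (by omega) (by omega) (BInv_pop vals i pos _ hInv rfl hl)
        · rw [if_neg htv, if_neg htv]
          have hpos1tv : ((pos.insert (vals.getD i "") (pos.getD (vals.getD i "") []).tail).getD tv []) = pos.getD tv [] :=
            PySem.Dict.getD_insert_of_ne _ _ _ (fun h => htv h.symm)
          rw [hpos1tv]
          cases hltv : pos.getD tv [] with
          | nil =>
            have hfa : aFindJ vals tv vals.length (i + 1) = none := by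
              refine aFindJ_none_of vals tv vals.length (i + 1) (by omega) ?_
              intro m hm1 hm2 hc
              have : ((m : Nat) : Int) ∈ pos.getD tv [] := ((hInv tv).2 _).2 ⟨m, rfl, by omega, hm2, hc⟩
              rw [hltv] at this
              cases this
            rw [hfa]
            exact ih vals (i + 1) _ swaps (by omega) (by omega) (BInv_pop vals i pos _ hInv rfl hl)
          | cons j rest =>
            have hj : j ∈ pos.getD tv [] := by rw [hltv]; exact List.mem_cons_self ..
            obtain ⟨m0, hjeq, hm0i, hm0l, hm0v⟩ := ((hInv tv).2 j).1 hj
            subst hjeq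
            have hm0i' : i + 1 ≤ m0 := by
              rcases Nat.lt_or_ge i m0 with h | h
              · omega
              · have : m0 = i := by omega
                subst this; exact absurd hm0v htv
            have hminimal : ∀ m, i + 1 ≤ m → m < m0 → vals.getD m "" ≠ tv := by
              intro m h1 h2 hc
              have hmemm : ((m : Nat) : Int) ∈ pos.getD tv [] := ((hInv tv).2 _).2 ⟨m, rfl, by omega, by omega, hc⟩
              rw [hltv] at hmemm
              rcases List.mem_cons.1 hmemm with h | h
              · omega
              · have := (List.pairwise_cons.1 (hltv ▸ (hInv tv).1)).1 _ h
                omega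
            have hfa : aFindJ vals tv vals.length (i + 1) = some m0 :=
              aFindJ_some_of vals tv vals.length (i + 1) m0 (by omega) hm0i' hm0l hm0v hminimal
            rw [hfa]
            simp only [Int.toNat_natCast]
            have hgu2 : (((pos.insert (vals.getD i "") (pos.getD (vals.getD i "") []).tail).insert tv rest).getD (vals.getD i "") [])
                = (pos.getD (vals.getD i "") []).tail := by
              rw [PySem.Dict.getD_insert_of_ne _ _ _ htv, PySem.Dict.getD_insert_self]
            rw [hgu2]
            refine ih (pySwapAt vals i m0) (i + 1) _ (swaps ++ [((i : Int), (m0 : Int))])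
              (by rw [length_pySwapAt]; omega) (by rw [length_pySwapAt]; omega) ?_
            have hlu' : pos.getD (vals.getD i "") [] = (i : Int) :: (pos.getD (vals.getD i "") []).tail := hl
            exact BInv_swap vals i m0 pos (vals.getD i "") tv _ rest hInv hi hm0i' hm0l rfl hm0v htv hlu' hltv
    · rw [if_neg hi, if_neg hi]

theorem calculateSwapsToTarget_py_spec : Claim_equal_calculateSwapsToTarget_py := by
  intro current target _hdom _hpre
  unfold Spec_calculateSwapsToTarget_py calculateSwapsToTarget_py calculateSwapsToTarget_py_alt
  refine loop_eq target current.length current 0 _ [] (by omega) (by omega) ?_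
  refine bBuild_spec current current.length 0 PySem.Dict.empty (by omega) ?_
  intro v
  constructor
  · simp [PySem.Dict.getD_empty]
  · intro k
    simp [PySem.Dict.getD_empty]
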